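-- pv_equiv track=rewrite | github.com/Empreiteiro/langflow-factory | components/document_processing/document_intelligence.py | update_build_config
-- ===== SOURCE A (Python) =====
-- def update_build_config(build_config, field_value, field_name=None):
--     if field_name != "action":
--         return build_config
--
--     # Extract action name from the selected action
--     selected = [action["name"] for action in field_value] if isinstance(field_value, list) else []
--
--     field_map = {
--         "Data Extraction": ["extraction_fields", "custom_prompt", "max_tokens"],
--         "Summarization": ["custom_prompt", "max_tokens"],
--         "Translation": ["target_language", "custom_prompt", "max_tokens"],
--         "Document Classification": ["classification_categories", "custom_prompt", "max_tokens"],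
--         "Chunk Classification": ["classification_categories", "custom_prompt", "max_tokens"],
--         "Text Quantification": ["quantification_metrics", "custom_prompt", "max_tokens"],
--     }
--
--     # Hide all dynamic fields first
--     for field_name in ["target_language", "extraction_fields", "classification_categories",
--                       "quantification_metrics", "custom_prompt", "max_tokens"]:
--         if field_name in build_config:
--             build_config[field_name]["show"] = False
--
--     # Show fields based on selected action
--     if len(selected) == 1 and selected[0] in field_map:
--         for field_name in field_map[selected[0]]:
--             if field_name in build_config:
--                 build_config[field_name]["show"] = True
--
--     return build_config
-- ===== SOURCE B (Python) =====
-- _FIELD_MAP = {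
--     "Data Extraction": ["extraction_fields", "custom_prompt", "max_tokens"],
--     "Summarization": ["custom_prompt", "max_tokens"],
--     "Translation": ["target_language", "custom_prompt", "max_tokens"],
--     "Document Classification": ["classification_categories", "custom_prompt", "max_tokens"],
--     "Chunk Classification": ["classification_categories", "custom_prompt", "max_tokens"],
--     "Text Quantification": ["quantification_metrics", "custom_prompt", "max_tokens"],
-- }
--
-- _DYNAMIC_FIELDS = frozenset([
--     "target_language", "extraction_fields", "classification_categories",
--     "quantification_metrics", "custom_prompt", "max_tokens",
-- ])
--
--
-- def update_build_config(build_config, field_value, field_name=None):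
--     if field_name != "action":
--         return build_config
--
--     # Extract action name from the selected action
--     selected = [action["name"] for action in field_value] if isinstance(field_value, list) else []
--
--     # Look up the visible-field list for the single selected action (if any),
--     # then walk the config itself: each dynamic field present gets its final
--     # visibility in one step.
--     action = selected[0] if len(selected) == 1 else None
--     visible = _FIELD_MAP.get(action, ())
--     for key, cfg in build_config.items():
--         if key in _DYNAMIC_FIELDS:
--             cfg["show"] = key in visible
--
--     return build_config
-- ===== Notes on version B (the rewrite author's own statement) =====
-- stated objective: simpler
-- what changed: A makes two schema-driven passes over a fixed field list (hide all six dynamic fields, then re-show the selected action's fields); B instead looks up the selected action's visible-field list once and iterates over the build_config entries themselves, writing each dynamic field's final visibility directly.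
import Mathlib
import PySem

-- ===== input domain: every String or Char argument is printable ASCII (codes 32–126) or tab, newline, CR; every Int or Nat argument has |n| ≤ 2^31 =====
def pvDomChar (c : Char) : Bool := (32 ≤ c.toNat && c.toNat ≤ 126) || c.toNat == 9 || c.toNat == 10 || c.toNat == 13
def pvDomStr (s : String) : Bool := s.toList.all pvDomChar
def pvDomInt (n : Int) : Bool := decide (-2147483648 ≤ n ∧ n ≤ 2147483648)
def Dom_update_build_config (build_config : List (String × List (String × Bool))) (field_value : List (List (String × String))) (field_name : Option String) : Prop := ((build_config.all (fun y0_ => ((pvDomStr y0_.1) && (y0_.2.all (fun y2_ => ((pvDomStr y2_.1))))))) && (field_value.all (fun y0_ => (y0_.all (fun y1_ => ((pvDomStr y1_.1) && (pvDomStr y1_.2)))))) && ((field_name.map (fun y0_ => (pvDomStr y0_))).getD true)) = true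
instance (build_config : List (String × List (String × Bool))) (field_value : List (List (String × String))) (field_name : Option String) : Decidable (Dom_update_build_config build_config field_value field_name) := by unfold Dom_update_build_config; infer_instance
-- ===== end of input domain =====

-- ===== PORT A =====
-- B replaces A's two schema-driven passes (hide all six dynamic fields, then re-show the
-- selected action's fields) by one walk over the build_config entries themselves, writing
-- each dynamic field's final visibility from a single field_map lookup; both Pythons mutate
-- build_config in place the same way, so the return value is the whole behaviour.
def update_build_config (build_config : List (String × List (String × Bool))) (field_value : List (List (String × String))) (field_name : Option String) : List (String × List (String × Bool)) :=
  if field_name ≠ some "action" then build_config else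
  -- selected = [action["name"] for action in field_value]  (Pre_ guarantees the key exists)
  let selected : List String := field_value.map (fun action => ((PySem.Dict.mk action).get? "name").getD "")
  let field_map : PySem.Dict String (List String) := PySem.Dict.mk [
    ("Data Extraction", ["extraction_fields", "custom_prompt", "max_tokens"]),
    ("Summarization", ["custom_prompt", "max_tokens"]),
    ("Translation", ["target_language", "custom_prompt", "max_tokens"]),
    ("Document Classification", ["classification_categories", "custom_prompt", "max_tokens"]),
    ("Chunk Classification", ["classification_categories", "custom_prompt", "max_tokens"]),
    ("Text Quantification", ["quantification_metrics", "custom_prompt", "max_tokens"])]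
  let bc0 : PySem.Dict String (PySem.Dict String Bool) :=
    PySem.Dict.mk (build_config.map (fun p => (p.1, PySem.Dict.mk p.2)))
  -- hide all dynamic fields first
  let bc1 := ["target_language", "extraction_fields", "classification_categories",
              "quantification_metrics", "custom_prompt", "max_tokens"].foldl
    (fun d f => if d.contains f then d.modify f PySem.Dict.empty (fun inner => inner.insert "show" false) else d) bc0
  -- show fields based on selected action
  let bc2 := if selected.length = 1 ∧ field_map.contains (PySem.List.pyGetD selected 0 "") then
      ((field_map.get? (PySem.List.pyGetD selected 0 "")).getD []).foldl
        (fun d f => if d.contains f then d.modify f PySem.Dict.empty (fun inner => inner.insert "show" true) else d) bc1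
    else bc1
  bc2.items.map (fun p => (p.1, p.2.items))

-- ===== PORT B =====
def update_build_config_alt (build_config : List (String × List (String × Bool))) (field_value : List (List (String × String))) (field_name : Option String) : List (String × List (String × Bool)) :=
  if field_name ≠ some "action" then build_config else
  let selected : List String := field_value.map (fun action => ((PySem.Dict.mk action).get? "name").getD "")
  let field_map : PySem.Dict String (List String) := PySem.Dict.mk [
    ("Data Extraction", ["extraction_fields", "custom_prompt", "max_tokens"]),
    ("Summarization", ["custom_prompt", "max_tokens"]),
    ("Translation", ["target_language", "custom_prompt", "max_tokens"]),
    ("Document Classification", ["classification_categories", "custom_prompt", "max_tokens"]),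
    ("Chunk Classification", ["classification_categories", "custom_prompt", "max_tokens"]),
    ("Text Quantification", ["quantification_metrics", "custom_prompt", "max_tokens"])]
  let dynamic_fields : PySem.Set String := PySem.Set.ofList
    ["target_language", "extraction_fields", "classification_categories",
     "quantification_metrics", "custom_prompt", "max_tokens"]
  -- action = selected[0] if len(selected) == 1 else None; visible = _FIELD_MAP.get(action, ())
  let action : Option String := if selected.length = 1 then some (PySem.List.pyGetD selected 0 "") else none
  let visible : List String := (action.bind (fun a => field_map.get? a)).getD []
  -- for key, cfg in build_config.items(): if key in _DYNAMIC_FIELDS: cfg["show"] = key in visible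
  let bc0 : PySem.Dict String (PySem.Dict String Bool) :=
    PySem.Dict.mk (build_config.map (fun p => (p.1, PySem.Dict.mk p.2)))
  bc0.items.map (fun p =>
    if dynamic_fields.contains p.1 then (p.1, (p.2.insert "show" (visible.contains p.1)).items)
    else (p.1, p.2.items))

-- ===== PRECONDITION & SPEC =====
-- Pre_ excludes (i) the inputs where Python raises KeyError (field_name == "action" while some
-- element of field_value lacks the key "name") and (ii) association lists with duplicate keys in
-- build_config, which represent no Python dict at all (a dict cannot have duplicate keys).
def Pre_update_build_config (build_config : List (String × List (String × Bool))) (field_value : List (List (String × String))) (field_name : Option String) : Prop :=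
  field_name = some "action" →
    (∀ a ∈ field_value, ((PySem.Dict.mk a).get? "name").isSome) ∧ (build_config.map Prod.fst).Nodup
instance (build_config : List (String × List (String × Bool))) (field_value : List (List (String × String))) (field_name : Option String) : Decidable (Pre_update_build_config build_config field_value field_name) := by unfold Pre_update_build_config; infer_instance
def pvWitness_update_build_config : (List (String × List (String × Bool))) × (List (List (String × String))) × Option String :=
  ([("custom_prompt", [("show", true)]), ("max_tokens", [("show", false)])],
   [[("name", "Summarization")]], some "action")
def Spec_update_build_config (build_config : List (String × List (String × Bool))) (field_value : List (List (String × String))) (field_name : Option String) (out : List (String × List (String × Bool))) : Prop := out = update_build_config_alt build_config field_value field_name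
instance (build_config : List (String × List (String × Bool))) (field_value : List (List (String × String))) (field_name : Option String) (out : List (String × List (String × Bool))) : Decidable (Spec_update_build_config build_config field_value field_name out) := by unfold Spec_update_build_config; infer_instance

-- ===== CLAIM (what is proved, stated in full; the proofs are below) =====
def Claim_equal_update_build_config : Prop := ∀ (build_config : List (String × List (String × Bool))) (field_value : List (List (String × String))) (field_name : Option String), Dom_update_build_config build_config field_value field_name → Pre_update_build_config build_config field_value field_name → Spec_update_build_config build_config field_value field_name (update_build_config build_config field_value field_name)

-- ===== LEMMAS AND PROOFS =====

-- the per-field update A performs: build_config[f]["show"] = b, guarded by membership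
def pvStep (b : Bool) (f : String) (d : PySem.Dict String (PySem.Dict String Bool)) : PySem.Dict String (PySem.Dict String Bool) :=
  if d.contains f then d.modify f PySem.Dict.empty (fun inner => inner.insert "show" b) else d

lemma pvKeys_pvStep (b : Bool) (f : String) (d : PySem.Dict String (PySem.Dict String Bool)) :
    (pvStep b f d).keys = d.keys := by
  unfold pvStep
  by_cases hc : d.contains f = true
  · rw [if_pos hc, PySem.Dict.keys_modify, PySem.Dict.keys_insert_of_contains _ _ hc]
  · rw [if_neg hc]

lemma pvItems_pvStep (b : Bool) (f : String) (d : PySem.Dict String (PySem.Dict String Bool))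
    (hd : d.keys.Nodup) :
    (pvStep b f d).items
      = d.items.map (fun p => if p.1 = f then (p.1, p.2.insert "show" b) else p) := by
  unfold pvStep PySem.Dict.modify
  by_cases hc : d.contains f = true
  · rw [if_pos hc, PySem.Dict.items_insert_of_contains _ _ hc]
    apply List.map_congr_left
    intro p hp
    by_cases hpf : p.1 = f
    · have hmem : (f, p.2) ∈ d.items := by
        have : p = (f, p.2) := by cases p; simp_all
        exact this ▸ hp
      rw [if_pos (by simpa using hpf), if_pos hpf,
          PySem.Dict.getD_of_mem_items d hmem hd PySem.Dict.empty]
      cases p; simp_all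
    · rw [if_neg (by simpa using hpf), if_neg hpf]
  · rw [if_neg hc]
    have hno : ∀ p ∈ d.items, p.1 ≠ f := by
      intro p hp hpf
      exact hc (PySem.Dict.contains_iff_mem_keys d f |>.mpr
        (hpf ▸ List.mem_map_of_mem hp))
    have := List.map_congr_left (l := d.items)
      (f := fun p => if p.1 = f then (p.1, p.2.insert "show" b) else p) (g := id)
      (fun p hp => by simp only [if_neg (hno p hp), id])
    simpa using this.symm

-- A's fold of per-field updates over distinct fields, seen item by item
lemma pvItems_foldl (L : List String) (b : String → Bool)
    (d : PySem.Dict String (PySem.Dict String Bool)) (hL : L.Nodup) (hd : d.keys.Nodup) :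
    (L.foldl (fun d f => pvStep (b f) f d) d).items
      = d.items.map (fun p => if p.1 ∈ L then (p.1, p.2.insert "show" (b p.1)) else p) := by
  induction L generalizing d with
  | nil => simp
  | cons m L ih =>
      simp only [List.foldl_cons]
      rw [ih (pvStep (b m) m d) hL.of_cons (by rw [pvKeys_pvStep]; exact hd),
          pvItems_pvStep (b m) m d hd, List.map_map]
      apply List.map_congr_left
      intro p _
      by_cases hpm : p.1 = m
      · have hmL : m ∉ L := (List.nodup_cons.mp hL).1
        simp [Function.comp, hpm, hmL]
      · by_cases hpL : p.1 ∈ L <;> simp [Function.comp, hpm, hpL]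

-- get? of the literal field_map yields one of the six (Nodup) sublists of the dynamic-field list
lemma pvFieldMap_cases (s : String) (l : List String)
    (h : (PySem.Dict.mk [
      ("Data Extraction", ["extraction_fields", "custom_prompt", "max_tokens"]),
      ("Summarization", ["custom_prompt", "max_tokens"]),
      ("Translation", ["target_language", "custom_prompt", "max_tokens"]),
      ("Document Classification", ["classification_categories", "custom_prompt", "max_tokens"]),
      ("Chunk Classification", ["classification_categories", "custom_prompt", "max_tokens"]),
      ("Text Quantification", ["quantification_metrics", "custom_prompt", "max_tokens"])] : PySem.Dict String (List String)).get? s = some l) :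
    l.Nodup ∧ ∀ f ∈ l, f ∈ ["target_language", "extraction_fields", "classification_categories",
              "quantification_metrics", "custom_prompt", "max_tokens"] := by
  simp only [PySem.Dict.get?_mk_cons] at h
  split_ifs at h
  all_goals first
    | (cases h; decide)
    | (simp [PySem.Dict.get?] at h)

-- What A's hide-then-show computes on the shared field-list visible (from field_map) with the
-- guard known: the fold with each field's final bit.
lemma pvHideShow_eq_final (visible : List String)
    (hvis : visible.Nodup ∧ ∀ f ∈ visible, f ∈ ["target_language", "extraction_fields",
      "classification_categories", "quantification_metrics", "custom_prompt", "max_tokens"])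
    (d : PySem.Dict String (PySem.Dict String Bool)) (hd : d.keys.Nodup) :
    (visible.foldl (fun d f => pvStep true f d)
       ((["target_language", "extraction_fields", "classification_categories",
          "quantification_metrics", "custom_prompt", "max_tokens"]).foldl
          (fun d f => pvStep false f d) d)).items
      = d.items.map (fun p =>
          if p.1 ∈ ["target_language", "extraction_fields", "classification_categories",
                    "quantification_metrics", "custom_prompt", "max_tokens"]
          then (p.1, p.2.insert "show" (visible.contains p.1)) else p) := by
  have hkeys : ∀ (M : List String) (x : PySem.Dict String (PySem.Dict String Bool)),
      x.keys.Nodup → (M.foldl (fun d f => pvStep false f d) x).keys.Nodup := by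
    intro M
    induction M with
    | nil => intro x hx; exact hx
    | cons m M ihm =>
        intro x hx
        simp only [List.foldl_cons]
        exact ihm _ (by rw [pvKeys_pvStep]; exact hx)
  rw [pvItems_foldl visible (fun _ => true) _ hvis.1 (hkeys _ _ hd),
      pvItems_foldl _ (fun _ => false) d (by decide) hd, List.map_map]
  apply List.map_congr_left
  intro p _
  by_cases hpL : p.1 ∈ ["target_language", "extraction_fields", "classification_categories",
      "quantification_metrics", "custom_prompt", "max_tokens"]
  · by_cases hpv : p.1 ∈ visible
    · simp [Function.comp, hpL, hpv, PySem.Dict.insert_insert_self]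
    · simp [Function.comp, hpL, hpv]
  · have hpv : p.1 ∉ visible := fun h => hpL (hvis.2 _ h)
    simp [Function.comp, hpL, hpv]

theorem update_build_config_spec : Claim_equal_update_build_config := by
  intro build_config field_value field_name _hdom hpre
  unfold Spec_update_build_config
  by_cases hfn : field_name = some "action"
  · obtain ⟨-, hnodup⟩ := hpre hfn
    subst hfn
    unfold update_build_config update_build_config_alt
    simp only [ne_eq, not_true_eq_false, if_false]
    set sel : List String := field_value.map (fun action => ((PySem.Dict.mk action).get? "name").getD "") with hsel
    set fm : PySem.Dict String (List String) := PySem.Dict.mk [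
      ("Data Extraction", ["extraction_fields", "custom_prompt", "max_tokens"]),
      ("Summarization", ["custom_prompt", "max_tokens"]),
      ("Translation", ["target_language", "custom_prompt", "max_tokens"]),
      ("Document Classification", ["classification_categories", "custom_prompt", "max_tokens"]),
      ("Chunk Classification", ["classification_categories", "custom_prompt", "max_tokens"]),
      ("Text Quantification", ["quantification_metrics", "custom_prompt", "max_tokens"])] with hfm
    set bc0 : PySem.Dict String (PySem.Dict String Bool) :=
      PySem.Dict.mk (build_config.map (fun p => (p.1, PySem.Dict.mk p.2))) with hbc0
    have hbc0keys : bc0.keys.Nodup := by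
      have : bc0.keys = build_config.map Prod.fst := by
        simp [hbc0, PySem.Dict.keys, List.map_map, Function.comp]
      rw [this]; exact hnodup
    -- the B side, with its lets unfolded
    show _ = bc0.items.map (fun p =>
        if (PySem.Set.ofList ["target_language", "extraction_fields", "classification_categories",
          "quantification_metrics", "custom_prompt", "max_tokens"]).contains p.1
        then (p.1, (p.2.insert "show"
          ((((if sel.length = 1 then some (PySem.List.pyGetD sel 0 "") else none).bind
              (fun a => fm.get? a)).getD []).contains p.1)).items)
        else (p.1, p.2.items))
    have hsetdyn : ∀ x : String,
        (PySem.Set.ofList ["target_language", "extraction_fields", "classification_categories",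
          "quantification_metrics", "custom_prompt", "max_tokens"]).contains x
        = decide (x ∈ ["target_language", "extraction_fields", "classification_categories",
          "quantification_metrics", "custom_prompt", "max_tokens"]) := by
      intro x
      by_cases hx : x ∈ ["target_language", "extraction_fields", "classification_categories",
          "quantification_metrics", "custom_prompt", "max_tokens"] <;>
        simp [PySem.Set.contains, hx, PySem.Set.mem_ofList]
    by_cases hg : sel.length = 1 ∧ fm.contains (PySem.List.pyGetD sel 0 "")
    · -- one known action: A shows its fields after hiding all, B writes membership bits
      obtain ⟨h1, h2⟩ := hg
      rw [PySem.Dict.contains_eq_isSome_get?] at h2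
      cases hq : fm.get? (PySem.List.pyGetD sel 0 "") with
      | none => rw [hq] at h2; simp at h2
      | some visible =>
          have hA := pvHideShow_eq_final visible (pvFieldMap_cases _ _ hq) bc0 hbc0keys
          rw [if_pos ⟨h1, by rw [PySem.Dict.contains_eq_isSome_get?, hq]; rfl⟩]
          show (visible.foldl (fun d f => pvStep true f d)
              ((["target_language", "extraction_fields", "classification_categories",
                 "quantification_metrics", "custom_prompt", "max_tokens"]).foldl
                 (fun d f => pvStep false f d) bc0)).items.map (fun p => (p.1, p.2.items)) = _
          rw [hA, List.map_map]
          apply List.map_congr_left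
          intro p _
          rw [hsetdyn, if_pos h1, Option.bind_some, hq, Option.getD_some]
          by_cases hpL : p.1 ∈ ["target_language", "extraction_fields", "classification_categories",
              "quantification_metrics", "custom_prompt", "max_tokens"] <;>
            simp [Function.comp, hpL]
    · -- no single known action: A only hides, B writes False bits
      rw [if_neg hg]
      show ((["target_language", "extraction_fields", "classification_categories",
          "quantification_metrics", "custom_prompt", "max_tokens"]).foldl
          (fun d f => pvStep false f d) bc0).items.map (fun p => (p.1, p.2.items)) = _
      have hA := pvItems_foldl ["target_language", "extraction_fields", "classification_categories",
          "quantification_metrics", "custom_prompt", "max_tokens"] (fun _ => false) bc0 (by decide) hbc0keys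
      rw [hA, List.map_map]
      apply List.map_congr_left
      intro p _
      have hvis : ((if sel.length = 1 then some (PySem.List.pyGetD sel 0 "") else none).bind
          (fun a => fm.get? a)).getD [] = [] := by
        by_cases h1 : sel.length = 1
        · rw [if_pos h1, Option.bind_some]
          cases hq : fm.get? (PySem.List.pyGetD sel 0 "") with
          | none => rfl
          | some l =>
              exact absurd ⟨h1, by rw [PySem.Dict.contains_eq_isSome_get?, hq]; rfl⟩ hg
        · rw [if_neg h1]; rfl
      rw [hsetdyn, hvis]
      by_cases hpL : p.1 ∈ ["target_language", "extraction_fields", "classification_categories",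
          "quantification_metrics", "custom_prompt", "max_tokens"] <;>
        simp [Function.comp, hpL]
  · simp [update_build_config, update_build_config_alt, hfn]
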